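-- pv_equiv track=rewrite | github.com/pypi-data/pypi-mirror-2 | packages/binstr/binstr-1.3.tar.gz/binstr-1.3/binstr.py | b_nor
-- ===== SOURCE A (Python) =====
-- def b_nor(A='00000000', B='00000000', align='right'): # {{{
--     '''
--     Perform a bitwise NOR on two strings of binary digits, A and B.
--     The align argument can be used to align the shortest of A and B to one
--       side of the other.
--     The returned string is the same length as the longest input.
--     E.g. b_or('0101', '0011') returns '1000'
--          b_or('01010000', '0011') returns '10101100'
--          b_or('01010000', '0011', align='left') returns '10001111'
--     '''
--     assert b_validate(A) == True, \
--         'Invalid b_string : A : %(actual)s' % {'actual': str(A)}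
--
--     assert b_validate(B) == True, \
--         'Invalid b_string : B : %(actual)s' % {'actual': str(B)}
--
--     assert type(align) is str, \
--         'Invalid type : align : Expected %(expect)s : %(actual)s' % {
--                                                                      'expect': str(type(str())),
--                                                                      'actual': str(type(align)),
--                                                                     }
--
--     assert align == 'right' or align == 'left', \
--         'Invalid value: align : Expected %(expect)s : %(actual)s' % {
--                                                                      'expect': '"left" OR "right"',
--                                                                      'actual': str(align),
--                                                                     }
--
--     if len(A) >= len(B): (p, q) = (A, B)
--     else:                (p, q) = (B, A)
--     del A, B
--
--     if align == 'right': q = '0'*(len(p) - len(q)) + q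
--     else:                q = q + '0'*(len(p) - len(q))
--
--     return ''.join([str(int( not( bool(int(a)) or bool(int(b)) ) )) for (a, b) in zip(p, q)])
--
-- def b_validate(A='', fail_empty=True): # {{{
--     '''
--     Validate that a given string contains only 0s and 1s.
--
--     This will return True if the string is valid, otherwise it returns False.
--
--     E.g. b_validate() returns False
--          b_validate('') returns False
--          b_validate('', fail_empty=False) returns True
--          b_validate('01010101') returns True
--          b_validate('010120101') returns False
--          b_validate('0101 0101') returns False
--     '''
--     # Assertions cannot be used in here because when optimisation is turned on they
--     #   will be compiled out.
--     t = True
--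
--     if t and not(type(A) is str): t = False
--     if t and fail_empty and not(len(A) > 0): t = False
--
--     if t:
--         from re import compile as re_compile
--         pattern = re_compile('[^01]')
--         t = not( bool(pattern.search(A)) )
--         del re_compile, pattern
--
--     return t
-- ===== SOURCE B (Python) =====
-- def b_validate(A='', fail_empty=True):
--     if type(A) is not str:
--         return False
--     if fail_empty and len(A) == 0:
--         return False
--     return all(c in '01' for c in A)
--
-- def b_nor(A='00000000', B='00000000', align='right'):
--     assert b_validate(A) == True, 'Invalid b_string : A : %s' % str(A)
--     assert b_validate(B) == True, 'Invalid b_string : B : %s' % str(B)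
--     assert type(align) is str
--     assert align == 'right' or align == 'left', 'Invalid value: align : %s' % str(align)
--     if len(A) >= len(B):
--         p, q = A, B
--     else:
--         p, q = B, A
--     n = len(p)
--     aq = int(q, 2)
--     if align == 'left':
--         aq <<= n - len(q)          # left-aligning appends zero bits
--     res = ((1 << n) - 1) - (int(p, 2) | aq)   # NOR = mask - OR (the OR never exceeds the mask)
--     return format(res, '0' + str(n) + 'b')
-- ===== Notes on version B (the rewrite author's own statement) =====
-- stated objective: alternative
-- what changed: B replaces A's per-character zip/join NOR loop by whole-integer bit arithmetic: both strings are converted with int(_, 2) (the shorter shifted left instead of padded for align='left'), the NOR is computed as mask - (ap | aq) in one machine-word-parallel operation, and the result is formatted back to a fixed-width binary string.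
import Mathlib
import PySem

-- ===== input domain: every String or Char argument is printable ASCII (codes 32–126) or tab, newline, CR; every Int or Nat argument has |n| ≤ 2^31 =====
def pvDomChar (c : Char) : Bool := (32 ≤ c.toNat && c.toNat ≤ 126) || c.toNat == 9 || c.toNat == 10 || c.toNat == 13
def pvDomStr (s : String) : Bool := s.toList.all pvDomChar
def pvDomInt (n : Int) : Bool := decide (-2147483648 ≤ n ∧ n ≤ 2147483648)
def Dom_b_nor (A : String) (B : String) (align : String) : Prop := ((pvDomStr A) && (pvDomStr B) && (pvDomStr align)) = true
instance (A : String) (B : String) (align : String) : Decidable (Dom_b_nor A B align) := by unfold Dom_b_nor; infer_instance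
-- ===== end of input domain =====

-- B replaces A's per-character NOR loop by whole-integer bit arithmetic: p and q are
-- converted with int(_, 2) (the 'left' case shifted instead of padded), the NOR is
-- mask - (ap | aq), and the result is formatted back to width n (objective: alternative).

-- ===== PORT A =====
-- re.search('[^01]', A), ported by hand: true iff some char of A is neither '0' nor '1' (exact).
def pvHasNonBit (cs : List Char) : Bool := cs.any (fun c => !(c == '0' || c == '1'))

-- 'type(A) is str' is always true under the type convention, so that branch never fires.
def b_validate (A : String) (fail_empty : Bool) : Bool :=
  let t := true
  let t := if t && fail_empty && !(decide (0 < A.toList.length)) then false else t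
  let t := if t then !(pvHasNonBit A.toList) else t
  t

def b_nor (A : String) (B : String) (align : String) : String :=
  -- the four asserts: A raises AssertionError on these inputs (excluded by Pre_b_nor)
  if !(b_validate A true) || !(b_validate B true) || !(align == "right" || align == "left") then ""
  else
    let pq := if A.toList.length ≥ B.toList.length then (A.toList, B.toList) else (B.toList, A.toList)
    let p := pq.1
    let q := pq.2
    let q := if align == "right" then List.replicate (p.length - q.length) '0' ++ q
             else q ++ List.replicate (p.length - q.length) '0'
    -- str(int(not(bool(int(a)) or bool(int(b))))): on the validated '0'/'1' chars this is
    -- '0' when a or b is '1', else '1' (exact; int(a) never raises under Pre_b_nor)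
    String.ofList ((p.zip q).map (fun ab => if ab.1 == '1' || ab.2 == '1' then '0' else '1'))

-- ===== PORT B =====
-- all(c in '01' for c in A)
def b_validate_alt (A : String) (fail_empty : Bool) : Bool :=
  if fail_empty && A.toList.length == 0 then false
  else A.toList.all (fun c => c == '0' || c == '1')

-- int(s, 2), ported by hand as a Horner fold: exact on nonempty strings over '0'/'1'
-- (no sign, whitespace or underscore present under Pre_b_nor)
def pvBitsVal (cs : List Char) : Nat :=
  cs.foldl (fun a c => 2 * a + (if c == '1' then 1 else 0)) 0

-- format(res, '0<n>b'), ported by hand: exact for 0 ≤ res < 2^n (here res is below the n-bit mask)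
def pvFmtBits : Nat → Nat → List Char
  | 0, _ => []
  | n + 1, m => pvFmtBits n (m / 2) ++ [if m % 2 == 1 then '1' else '0']

-- all intermediate ints are nonnegative and every subtraction has a larger minuend,
-- so Nat arithmetic is exact here
def b_nor_alt (A : String) (B : String) (align : String) : String :=
  if !(b_validate_alt A true) || !(b_validate_alt B true) || !(align == "right" || align == "left") then ""
  else
    let p := if A.toList.length ≥ B.toList.length then A.toList else B.toList
    let q := if A.toList.length ≥ B.toList.length then B.toList else A.toList
    let n := p.length
    let aq := if align == "left" then pvBitsVal q <<< (n - q.length) else pvBitsVal q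
    let res := ((1 <<< n) - 1) - (pvBitsVal p ||| aq)
    String.ofList (pvFmtBits n res)

-- ===== PRECONDITION & SPEC =====
-- Pre_ excludes exactly the inputs on which A's asserts raise AssertionError:
-- empty or non-'0'/'1' strings and an align other than "right"/"left".
def Pre_b_nor (A : String) (B : String) (align : String) : Prop :=
  A.toList ≠ [] ∧ (A.toList.all (fun c => c == '0' || c == '1')) = true ∧
  B.toList ≠ [] ∧ (B.toList.all (fun c => c == '0' || c == '1')) = true ∧
  (align = "right" ∨ align = "left")
instance (A : String) (B : String) (align : String) : Decidable (Pre_b_nor A B align) := by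
  unfold Pre_b_nor; infer_instance

def pvWitness_b_nor : String × String × String := ("0101", "01", "right")

def Spec_b_nor (A : String) (B : String) (align : String) (out : String) : Prop := out = b_nor_alt A B align
instance (A : String) (B : String) (align : String) (out : String) : Decidable (Spec_b_nor A B align out) := by unfold Spec_b_nor; infer_instance

-- ===== CLAIM (what is proved, stated in full; the proofs are below) =====
def Claim_equal_b_nor : Prop := ∀ (A : String) (B : String) (align : String), Dom_b_nor A B align → Pre_b_nor A B align → Spec_b_nor A B align (b_nor A B align)

-- ===== LEMMAS AND PROOFS =====

lemma pvBitsVal_snoc (l : List Char) (c : Char) :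
    pvBitsVal (l ++ [c]) = 2 * pvBitsVal l + (if c == '1' then 1 else 0) := by
  simp [pvBitsVal]

lemma pvBitsVal_lt (l : List Char) : pvBitsVal l < 2 ^ l.length := by
  induction l using List.reverseRecOn with
  | nil => simp [pvBitsVal]
  | append_singleton l c ih =>
    rw [pvBitsVal_snoc]
    simp only [List.length_append, List.length_singleton, pow_succ]
    split <;> omega

lemma pvBitsVal_pad_left (k : Nat) (q : List Char) :
    pvBitsVal (List.replicate k '0' ++ q) = pvBitsVal q := by
  induction k with
  | zero => simp
  | succ k ih => simpa [List.replicate_succ, pvBitsVal, List.foldl] using ih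

lemma pvBitsVal_pad_right (q : List Char) (k : Nat) :
    pvBitsVal (q ++ List.replicate k '0') = pvBitsVal q * 2 ^ k := by
  induction k with
  | zero => simp
  | succ k ih =>
    rw [pow_succ, List.replicate_succ', ← List.append_assoc, pvBitsVal_snoc, ih]
    simp; ring

-- the core fact: formatting the masked complement of the OR of the two values
-- is exactly A's per-character NOR map (for equal-length char lists)
lemma pv_core (p q : List Char) (h : p.length = q.length) :
    pvFmtBits p.length (2 ^ p.length - 1 - (pvBitsVal p ||| pvBitsVal q)) =
      (p.zip q).map (fun ab => if ab.1 == '1' || ab.2 == '1' then '0' else '1') := by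
  induction p using List.reverseRecOn generalizing q with
  | nil =>
    have : q = [] := List.eq_nil_of_length_eq_zero h.symm
    subst this; simp [pvFmtBits]
  | append_singleton p a ih =>
    cases q using List.reverseRecOn with
    | nil => simp at h
    | append_singleton q b _ =>
      have hlen : p.length = q.length := by simpa using h
      have hba : (if a == '1' then 1 else 0) = (a == '1').toNat := by cases a == '1' <;> simp
      have hbb : (if b == '1' then 1 else 0) = (b == '1').toNat := by cases b == '1' <;> simp
      have hvp : pvBitsVal (p ++ [a]) = Nat.bit (a == '1') (pvBitsVal p) := by
        rw [pvBitsVal_snoc, Nat.bit_val, hba]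
      have hvq : pvBitsVal (q ++ [b]) = Nat.bit (b == '1') (pvBitsVal q) := by
        rw [pvBitsVal_snoc, Nat.bit_val, hbb]
      have hz : pvBitsVal p ||| pvBitsVal q < 2 ^ p.length :=
        Nat.or_lt_two_pow (pvBitsVal_lt p) (hlen ▸ pvBitsVal_lt q)
      set z := pvBitsVal p ||| pvBitsVal q with hzdef
      set bb : Bool := (a == '1') || (b == '1') with hbbdef
      have hM : 2 ^ (p.length + 1) - 1 - (pvBitsVal (p ++ [a]) ||| pvBitsVal (q ++ [b]))
          = 2 * (2 ^ p.length - 1 - z) + (!bb).toNat := by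
        rw [hvp, hvq, Nat.lor_bit, Nat.bit_val, ← hzdef, ← hbbdef, pow_succ]
        cases bb <;> simp <;> omega
      have hlen2 : (p ++ [a]).length = p.length + 1 := by simp
      rw [hlen2, hM]
      show pvFmtBits p.length ((2 * (2 ^ p.length - 1 - z) + (!bb).toNat) / 2) ++
          [if (2 * (2 ^ p.length - 1 - z) + (!bb).toNat) % 2 == 1 then '1' else '0'] = _
      have hdiv : (2 * (2 ^ p.length - 1 - z) + (!bb).toNat) / 2 = 2 ^ p.length - 1 - z := by
        cases bb <;> simp <;> omega
      have hmod : (2 * (2 ^ p.length - 1 - z) + (!bb).toNat) % 2 = (!bb).toNat := by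
        cases bb <;> simp
      rw [hdiv, hmod, ih q hlen, List.zip_append (by simpa using hlen)]
      simp only [List.map_append]
      congr 1
      cases ha : a == '1' <;> cases hb : b == '1' <;>
        simp only [beq_eq_false_iff_ne, beq_iff_eq, ne_eq] at ha hb <;>
        simp [hbbdef, ha, hb]

lemma pv_validate_true {A : String} (h1 : A.toList ≠ []) (h2 : ∀ c ∈ A.toList, c = '0' ∨ c = '1') :
    b_validate A true = true := by
  have hl : 0 < A.toList.length := List.length_pos_iff.mpr h1
  have hnb : pvHasNonBit A.toList = false := by
    simp only [pvHasNonBit, List.any_eq_false]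
    intro c hc
    rcases h2 c hc with h | h <;> simp [h]
  simp only [b_validate, hnb, decide_eq_true hl, Bool.not_true, Bool.and_false,
    Bool.false_eq_true, if_false, if_true, Bool.not_false, Bool.true_and]

lemma pv_validate_alt_true {A : String} (h1 : A.toList ≠ []) (h2 : ∀ c ∈ A.toList, c = '0' ∨ c = '1') :
    b_validate_alt A true = true := by
  have hl : (A.toList.length == 0) = false := by
    have := List.length_pos_iff.mpr h1
    simp only [beq_eq_false_iff_ne, ne_eq]
    omega
  simp only [b_validate_alt, hl, Bool.and_false, Bool.false_eq_true, if_false, List.all_eq_true]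
  intro c hc
  rcases h2 c hc with h | h <;> simp [h]

-- the two ports agree once p (the longer) and q (the shorter) are fixed: 'right' case
lemma pv_main_right (p q : List Char) (hpq : q.length ≤ p.length) :
    String.ofList ((p.zip (List.replicate (p.length - q.length) '0' ++ q)).map
        (fun ab => if ab.1 == '1' || ab.2 == '1' then '0' else '1')) =
    String.ofList (pvFmtBits p.length (((1 <<< p.length) - 1) - (pvBitsVal p ||| pvBitsVal q))) := by
  apply congrArg
  have hlen : p.length = (List.replicate (p.length - q.length) '0' ++ q).length := by
    simp; omega
  rw [Nat.shiftLeft_eq, one_mul, ← pvBitsVal_pad_left (p.length - q.length) q]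
  exact (pv_core p _ hlen).symm

-- and the 'left' case: trailing zero padding is a left shift of the value
lemma pv_main_left (p q : List Char) (hpq : q.length ≤ p.length) :
    String.ofList ((p.zip (q ++ List.replicate (p.length - q.length) '0')).map
        (fun ab => if ab.1 == '1' || ab.2 == '1' then '0' else '1')) =
    String.ofList (pvFmtBits p.length (((1 <<< p.length) - 1) - (pvBitsVal p ||| pvBitsVal q <<< (p.length - q.length)))) := by
  apply congrArg
  have hlen : p.length = (q ++ List.replicate (p.length - q.length) '0').length := by
    simp; omega
  rw [Nat.shiftLeft_eq, one_mul, Nat.shiftLeft_eq, ← pvBitsVal_pad_right q (p.length - q.length)]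
  exact (pv_core p _ hlen).symm

-- ===== VERDICT (by name: the statement is the Claim_ definition above) =====
theorem b_nor_spec : Claim_equal_b_nor := by
  intro A B align _ hpre
  obtain ⟨hA1, hA2b, hB1, hB2b, hal⟩ := hpre
  have hA2 : ∀ c ∈ A.toList, c = '0' ∨ c = '1' := by simpa using hA2b
  have hB2 : ∀ c ∈ B.toList, c = '0' ∨ c = '1' := by simpa using hB2b
  unfold Spec_b_nor b_nor b_nor_alt
  have gA := pv_validate_true hA1 hA2
  have gB := pv_validate_true hB1 hB2
  have gA' := pv_validate_alt_true hA1 hA2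
  have gB' := pv_validate_alt_true hB1 hB2
  have galign : (align == "right" || align == "left") = true := by
    rcases hal with h | h <;> simp [h]
  have hg1 : (!b_validate A true || !b_validate B true || !(align == "right" || align == "left")) = false := by
    simp [gA, gB, galign]
  have hg2 : (!b_validate_alt A true || !b_validate_alt B true || !(align == "right" || align == "left")) = false := by
    simp [gA', gB', galign]
  simp only [hg1, hg2, Bool.false_eq_true, if_false]
  by_cases hge : A.toList.length ≥ B.toList.length
  · simp only [if_pos hge]
    rcases hal with h | h <;> subst h
    · simp only [show (("right" : String) == "right") = true from by decide,
        show (("right" : String) == "left") = false from by decide,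
        if_true, Bool.false_eq_true, if_false]
      exact pv_main_right A.toList B.toList hge
    · simp only [show (("left" : String) == "right") = false from by decide,
        show (("left" : String) == "left") = true from by decide,
        if_true, Bool.false_eq_true, if_false]
      exact pv_main_left A.toList B.toList hge
  · simp only [if_neg hge]
    rcases hal with h | h <;> subst h
    · simp only [show (("right" : String) == "right") = true from by decide,
        show (("right" : String) == "left") = false from by decide,
        if_true, Bool.false_eq_true, if_false]
      exact pv_main_right B.toList A.toList (le_of_not_ge hge)
    · simp only [show (("left" : String) == "right") = false from by decide,
        show (("left" : String) == "left") = true from by decide,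
        if_true, Bool.false_eq_true, if_false]
      exact pv_main_left B.toList A.toList (le_of_not_ge hge)
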